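-- pv_equiv track=rewrite | github.com/KwonYoungbin/Programmers-Practice | Python/Level1/모의고사.py | solution
-- ===== SOURCE A (Python) =====
-- def solution(answers):
--     answer = []
--     c1, c2, c3 = 0, 0, 0
--
--     supo1 = [1, 2, 3, 4, 5]
--     supo2 = [2, 1, 2, 3, 2, 4, 2, 5]
--     supo3 = [3, 3, 1, 1, 2, 2, 4, 4, 5, 5]
--
--     for i in range(len(answers)):
--         if answers[i] == supo1[i % len(supo1)]:
--             c1 += 1
--         if answers[i] == supo2[i % len(supo2)]:
--             c2 += 1
--         if answers[i] == supo3[i % len(supo3)]: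
--             c3 += 1
--
--     max_val = max(c1, max(c2, c3))
--
--     if c1 == max_val: answer.append(1)
--     if c2 == max_val: answer.append(2)
--     if c3 == max_val: answer.append(3)
--
--     return answer
-- ===== SOURCE B (Python) =====
-- def solution(answers):
--     # Histogram approach: one pass builds counts of (position mod 40, value) pairs
--     # (40 = lcm of the three pattern lengths, so each pattern is constant on a
--     # residue class mod 40); each supo's score is then a 40-term histogram sum.
--     hist = {}
--     for i, a in enumerate(answers):
--         k = (i % 40, a)
--         hist[k] = hist.get(k, 0) + 1
--     patterns = [[1, 2, 3, 4, 5],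
--                 [2, 1, 2, 3, 2, 4, 2, 5],
--                 [3, 3, 1, 1, 2, 2, 4, 4, 5, 5]]
--     scores = [sum(hist.get((r, p[r % len(p)]), 0) for r in range(40))
--               for p in patterns]
--     best = max(scores)
--     return [k + 1 for k, s in enumerate(scores) if s == best]
-- ===== Notes on version B (the rewrite author's own statement) =====
-- stated objective: alternative
-- what changed: Replaces A's fused per-element loop with three simultaneous pattern comparisons by a residue histogram: one pass counts (index mod 40, value) pairs in a dict (40 = lcm of the pattern lengths), each supo's score becomes a 40-term histogram lookup sum, and the winners are selected by a comprehension over the score list.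
import Mathlib
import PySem

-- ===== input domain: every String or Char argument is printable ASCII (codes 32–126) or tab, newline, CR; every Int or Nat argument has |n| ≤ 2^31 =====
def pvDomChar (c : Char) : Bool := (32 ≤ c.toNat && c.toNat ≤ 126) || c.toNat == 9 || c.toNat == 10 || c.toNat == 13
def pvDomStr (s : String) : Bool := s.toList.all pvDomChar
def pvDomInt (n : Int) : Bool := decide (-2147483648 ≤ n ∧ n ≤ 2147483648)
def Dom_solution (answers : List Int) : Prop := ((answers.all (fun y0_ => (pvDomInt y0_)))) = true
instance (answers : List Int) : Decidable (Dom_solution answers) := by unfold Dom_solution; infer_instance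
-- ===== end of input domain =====

-- B replaces A's fused single loop (three simultaneous counters) by a one-pass
-- (index mod 40, value) histogram dict plus 40-term lookup sums per pattern and a
-- comprehension-based selection; objective: alternative, same cost.


-- ===== PORT A =====
-- answers[i] and supo[i % len] are always in range, so pyGetD … 0 is exact here.
def solution (answers : List Int) : List Int :=
  let supo1 : List Int := [1, 2, 3, 4, 5]
  let supo2 : List Int := [2, 1, 2, 3, 2, 4, 2, 5]
  let supo3 : List Int := [3, 3, 1, 1, 2, 2, 4, 4, 5, 5]
  let c : Int × Int × Int :=
    (PySem.List.pyRange 0 (answers.length : Int) 1).foldl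
      (fun c i =>
        let c1 := if PySem.List.pyGetD answers i 0 =
                     PySem.List.pyGetD supo1 (PySem.Int.mod i (supo1.length : Int)) 0
                  then c.1 + 1 else c.1
        let c2 := if PySem.List.pyGetD answers i 0 =
                     PySem.List.pyGetD supo2 (PySem.Int.mod i (supo2.length : Int)) 0
                  then c.2.1 + 1 else c.2.1
        let c3 := if PySem.List.pyGetD answers i 0 =
                     PySem.List.pyGetD supo3 (PySem.Int.mod i (supo3.length : Int)) 0
                  then c.2.2 + 1 else c.2.2
        (c1, c2, c3))
      (0, 0, 0)
  let maxVal := max c.1 (max c.2.1 c.2.2)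
  let answer : List Int := []
  let answer := if c.1 = maxVal then answer ++ [1] else answer
  let answer := if c.2.1 = maxVal then answer ++ [2] else answer
  let answer := if c.2.2 = maxVal then answer ++ [3] else answer
  answer

-- ===== PORT B =====
-- hist[k] = hist.get(k, 0) + 1 over k = (i % 40, a); the dict keys are Int × Int pairs.
def solution_alt (answers : List Int) : List Int :=
  let hist : PySem.Dict (Int × Int) Int :=
    (PySem.List.enumerate answers).foldl
      (fun d ia =>
        let k : Int × Int := (PySem.Int.mod ia.1 40, ia.2)
        d.insert k (d.getD k 0 + 1))
      PySem.Dict.empty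
  let patterns : List (List Int) :=
    [[1, 2, 3, 4, 5], [2, 1, 2, 3, 2, 4, 2, 5], [3, 3, 1, 1, 2, 2, 4, 4, 5, 5]]
  let scores := patterns.map (fun p =>
    (PySem.List.pyRange 0 40 1).foldl
      (fun s r =>
        s + hist.getD (r, PySem.List.pyGetD p (PySem.Int.mod r (p.length : Int)) 0) 0)
      0)
  let best := (PySem.List.max? scores (fun y => y)).getD 0   -- scores has 3 elements, so max? is some: exact
  ((PySem.List.enumerate scores).filter (fun is => is.2 = best)).map (fun is => is.1 + 1)

-- ===== PRECONDITION & SPEC =====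
def Spec_solution (answers : List Int) (out : List Int) : Prop := out = solution_alt answers
instance (answers : List Int) (out : List Int) : Decidable (Spec_solution answers out) := by unfold Spec_solution; infer_instance

-- ===== CLAIM (what is proved, stated in full; the proofs are below) =====
def Claim_equal_solution : Prop := ∀ (answers : List Int), Dom_solution answers → Spec_solution answers (solution answers)

-- ===== LEMMAS AND PROOFS =====

-- the key computed in B's histogram loop
def pvKey (ia : Int × Int) : Int × Int := (PySem.Int.mod ia.1 40, ia.2)

-- B's histogram, in the map-then-count form the lemmas talk about
def pvHist (answers : List Int) : PySem.Dict (Int × Int) Int :=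
  ((PySem.List.enumerate answers).map pvKey).foldl
    (fun d x => d.insert x (d.getD x 0 + 1)) PySem.Dict.empty

theorem pvHist_getD (answers : List Int) (v : Int × Int) :
    (pvHist answers).getD v 0 = (((PySem.List.enumerate answers).map pvKey).count v : Int) := by
  unfold pvHist
  rw [PySem.Dict.getD_foldl_insert_add_one]
  simp

-- a sum over R' none of whose elements is x contributes nothing
theorem pvSumZero (t : Int → Int) (x y : Int) (R : List Int) (hx : x ∉ R) :
    (R.map (fun r => if (x, y) = (r, t r) then (1 : Int) else 0)).sum = 0 := by
  induction R with
  | nil => rfl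
  | cons r R ih =>
    have hxr : x ≠ r := fun h => hx (h ▸ List.mem_cons_self)
    have : ¬ ((x, y) = (r, t r)) := by
      intro h; exact hxr (congrArg Prod.fst h)
    simp only [List.map_cons, List.sum_cons, if_neg this, zero_add]
    exact ih (fun h => hx (List.mem_cons_of_mem _ h))

-- over a duplicate-free R containing x, the indicator sum picks the single r = x
theorem pvSumInd (t : Int → Int) (x y : Int) (R : List Int) (hn : R.Nodup) (hx : x ∈ R) :
    (R.map (fun r => if (x, y) = (r, t r) then (1 : Int) else 0)).sum
      = if y = t x then 1 else 0 := by
  induction R with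
  | nil => cases hx
  | cons r R ih =>
    simp only [List.map_cons, List.sum_cons]
    by_cases hxr : x = r
    · subst hxr
      have hxnotin : x ∉ R := (List.nodup_cons.mp hn).1
      rw [pvSumZero t x y R hxnotin, add_zero]
      by_cases hy : y = t x
      · simp [hy]
      · have : ¬ ((x, y) = (x, t x)) := by
          intro h; exact hy (congrArg Prod.snd h)
        simp [this, hy]
    · have : ¬ ((x, y) = (r, t r)) := by
        intro h; exact hxr (congrArg Prod.fst h)
      rw [if_neg this, zero_add]
      exact ih (List.nodup_cons.mp hn).2 ((List.mem_cons.mp hx).resolve_left hxr)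

-- the histogram sum over a residue list R equals the direct match count
theorem pvSumCountP (m a t : Int → Int) (R : List Int) (hn : R.Nodup) (l : List Int)
    (hm : ∀ j ∈ l, m j ∈ R) :
    (R.map (fun r => (l.countP (fun j => decide ((m j, a j) = (r, t r))) : Int))).sum
      = (l.countP (fun j => decide (a j = t (m j))) : Int) := by
  induction l with
  | nil => simp
  | cons j l ih =>
    have hmj : m j ∈ R := hm j List.mem_cons_self
    have hml : ∀ j' ∈ l, m j' ∈ R := fun j' h => hm j' (List.mem_cons_of_mem _ h)
    simp only [List.countP_cons]
    have hsplit :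
        (R.map (fun r => ((l.countP (fun j' => decide ((m j', a j') = (r, t r)))
            + if decide ((m j, a j) = (r, t r)) = true then 1 else 0 : Nat) : Int))).sum
          = (R.map (fun r => (l.countP (fun j' => decide ((m j', a j') = (r, t r))) : Int))).sum
            + (R.map (fun r => if (m j, a j) = (r, t r) then (1 : Int) else 0)).sum := by
      rw [← List.sum_map_add]
      apply congrArg List.sum
      apply List.map_congr_left
      intro r _
      push_cast
      by_cases h : (m j, a j) = (r, t r) <;> simp [h]
    rw [hsplit, ih hml, pvSumInd t (m j) (a j) R hn hmj]
    push_cast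
    by_cases h : a j = t (m j) <;> simp [h]

-- per-pattern: B's 40-term histogram sum equals A's per-index match count
theorem pvPattern (answers p : List Int) (hpos : 0 < (p.length : Int))
    (hdvd : (p.length : Int) ∣ 40) :
    (PySem.List.pyRange 0 40 1).foldl
      (fun s r =>
        s + (pvHist answers).getD (r, PySem.List.pyGetD p (PySem.Int.mod r (p.length : Int)) 0) 0)
      0
    = (PySem.List.pyRange 0 (answers.length : Int) 1).foldl
        (fun s i => if PySem.List.pyGetD answers i 0 =
            PySem.List.pyGetD p (PySem.Int.mod i (p.length : Int)) 0 then s + 1 else s) 0 := by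
  set t : Int → Int := fun r => PySem.List.pyGetD p (PySem.Int.mod r (p.length : Int)) 0 with ht
  -- left side: fold-of-additions is a sum of histogram lookups
  rw [PySem.List.foldl_add (g := fun r => (pvHist answers).getD (r, t r) 0), zero_add]
  -- right side: counting loop is a countP
  rw [PySem.List.foldl_ite_add_one
    (p := fun i => PySem.List.pyGetD answers i 0 = t i), zero_add]
  -- histogram lookups are counts of mapped keys over the index range
  have hkey : ∀ r : Int,
      (pvHist answers).getD (r, t r) 0
        = ((PySem.List.pyRange 0 (answers.length : Int) 1).countP
            (fun j => decide ((PySem.Int.mod j 40, PySem.List.pyGetD answers j 0) = (r, t r))) : Int) := by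
    intro r
    rw [pvHist_getD]
    rw [PySem.List.enumerate_eq_map_pyRange (d := 0), List.map_map]
    rw [List.count_eq_countP, List.countP_map, PySem.List.len_eq]
    congr 1
    apply List.countP_congr
    intro j _
    simp [pvKey]
  have hmaprw :
      ((PySem.List.pyRange 0 40 1).map (fun r => (pvHist answers).getD (r, t r) 0))
        = (PySem.List.pyRange 0 40 1).map (fun r =>
            ((PySem.List.pyRange 0 (answers.length : Int) 1).countP
              (fun j => decide ((PySem.Int.mod j 40, PySem.List.pyGetD answers j 0) = (r, t r))) : Int)) := by
    apply List.map_congr_left; intro r _; exact hkey r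
  rw [hmaprw]
  rw [pvSumCountP (fun j => PySem.Int.mod j 40) (fun j => PySem.List.pyGetD answers j 0) t
      (PySem.List.pyRange 0 40 1)
      (by decide)
      (PySem.List.pyRange 0 (answers.length : Int) 1)
      (by
        intro j _
        rw [PySem.List.mem_pyRange_one]
        exact ⟨PySem.Int.mod_nonneg j (by norm_num), PySem.Int.mod_lt j (by norm_num)⟩)]
  -- t (j % 40) = t j since p.length divides 40
  congr 1
  apply List.countP_congr
  intro j _
  have hmm : PySem.Int.mod (PySem.Int.mod j 40) (p.length : Int) = PySem.Int.mod j (p.length : Int) := by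
    rw [PySem.Int.mod_eq_emod_of_pos (a := j) (b := 40) (by norm_num),
        PySem.Int.mod_eq_emod_of_pos hpos, PySem.Int.mod_eq_emod_of_pos hpos]
    exact Int.emod_emod_of_dvd j hdvd
  simp only [ht, hmm]

-- the fused fold computes the three counts simultaneously
theorem pvFused {α : Type} (b1 b2 b3 : α → Prop) [DecidablePred b1] [DecidablePred b2]
    [DecidablePred b3] (l : List α) (c : Int × Int × Int) :
    l.foldl
      (fun c x =>
        (if b1 x then c.1 + 1 else c.1,
         if b2 x then c.2.1 + 1 else c.2.1,
         if b3 x then c.2.2 + 1 else c.2.2)) c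
    = (l.foldl (fun s x => if b1 x then s + 1 else s) c.1,
       l.foldl (fun s x => if b2 x then s + 1 else s) c.2.1,
       l.foldl (fun s x => if b3 x then s + 1 else s) c.2.2) := by
  induction l generalizing c with
  | nil => rfl
  | cons x xs ih =>
    simp only [List.foldl_cons]
    rw [ih]

-- the two selection phases agree on any triple of scores
set_option maxRecDepth 4000 in
theorem pvSelect (s1 s2 s3 : Int) :
    (let maxVal := max s1 (max s2 s3)
     let a : List Int := []
     let a := if s1 = maxVal then a ++ [1] else a
     let a := if s2 = maxVal then a ++ [2] else a
     if s3 = maxVal then a ++ [3] else a)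
    = ((PySem.List.enumerate [s1, s2, s3]).filter
        (fun is => is.2 = (PySem.List.max? [s1, s2, s3] (fun y => y)).getD 0)).map
        (fun is => is.1 + 1) := by
  simp only [PySem.List.max?_id_cons, List.foldl_cons, List.foldl_nil, Option.getD_some,
    PySem.List.enumerate_cons, PySem.List.enumerate_nil, List.filter_cons, List.filter_nil,
    decide_eq_true_eq, max_assoc]
  split_ifs <;> simp

-- B's histogram loop is pvHist
theorem pvHistLoop (answers : List Int) :
    (PySem.List.enumerate answers).foldl
      (fun d ia =>
        let k : Int × Int := (PySem.Int.mod ia.1 40, ia.2)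
        d.insert k (d.getD k 0 + 1))
      PySem.Dict.empty = pvHist answers := by
  unfold pvHist
  rw [List.foldl_map]
  rfl

theorem solution_eq (answers : List Int) :
    solution answers = solution_alt answers := by
  unfold solution solution_alt
  simp only [pvHistLoop, List.map]
  rw [pvFused (α := Int)
    (fun i => PySem.List.pyGetD answers i 0 =
      PySem.List.pyGetD [1, 2, 3, 4, 5] (PySem.Int.mod i (([1, 2, 3, 4, 5] : List Int).length : Int)) 0)
    (fun i => PySem.List.pyGetD answers i 0 =
      PySem.List.pyGetD [2, 1, 2, 3, 2, 4, 2, 5]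
        (PySem.Int.mod i (([2, 1, 2, 3, 2, 4, 2, 5] : List Int).length : Int)) 0)
    (fun i => PySem.List.pyGetD answers i 0 =
      PySem.List.pyGetD [3, 3, 1, 1, 2, 2, 4, 4, 5, 5]
        (PySem.Int.mod i (([3, 3, 1, 1, 2, 2, 4, 4, 5, 5] : List Int).length : Int)) 0)
    (PySem.List.pyRange 0 (answers.length : Int) 1) ((0 : Int), (0 : Int), (0 : Int))]
  rw [← pvPattern answers [1, 2, 3, 4, 5] (by norm_num) (by norm_num),
      ← pvPattern answers [2, 1, 2, 3, 2, 4, 2, 5] (by norm_num) (by norm_num),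
      ← pvPattern answers [3, 3, 1, 1, 2, 2, 4, 4, 5, 5] (by norm_num) (by norm_num)]
  exact pvSelect _ _ _

-- ===== VERDICT (by name: the statement is the Claim_ definition above) =====
theorem solution_spec : Claim_equal_solution := by
  intro answers _
  unfold Spec_solution
  exact solution_eq answers
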